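-- pv_equiv track=rewrite | github.com/harresbintariq/voice_agent | text_ans_tal2.py | vectorization_input_question
-- ===== SOURCE A (Python) =====
-- def vectorization_input_question(input_question,occurence_dict_final):
--     input_question_feature_dict = {}
--     for index,vocab_question in enumerate(occurence_dict_final):
--         counts = dict()
--         input_words = input_question.split()
--         vocab_question_keys = occurence_dict_final[index].keys()#.split()
--         for vocab_question_word in vocab_question_keys:
--            counts[vocab_question_word] = input_words.count(vocab_question_word)
--         input_question_feature_dict[index] = counts
--     return input_question_feature_dict
-- ===== SOURCE B (Python) =====
-- def vectorization_input_question(input_question, occurence_dict_final):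
--     # One pass over the input words, distributing increments into pre-zeroed count dicts.
--     counts_list = [{k: 0 for k in d} for d in occurence_dict_final]
--     for word in input_question.split():
--         for counts in counts_list:
--             if word in counts:
--                 counts[word] += 1
--     return {i: c for i, c in enumerate(counts_list)}
-- ===== Notes on version B (the rewrite author's own statement) =====
-- stated objective: faster
-- what changed: Inverts the loop nesting: instead of calling input_words.count(key) for every vocab key (rescanning the whole word list once per key), B pre-initializes every vocab key to zero and makes a single pass over the input words, incrementing the matching entry of each vocab counter via dict lookup.
import Mathlib
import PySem

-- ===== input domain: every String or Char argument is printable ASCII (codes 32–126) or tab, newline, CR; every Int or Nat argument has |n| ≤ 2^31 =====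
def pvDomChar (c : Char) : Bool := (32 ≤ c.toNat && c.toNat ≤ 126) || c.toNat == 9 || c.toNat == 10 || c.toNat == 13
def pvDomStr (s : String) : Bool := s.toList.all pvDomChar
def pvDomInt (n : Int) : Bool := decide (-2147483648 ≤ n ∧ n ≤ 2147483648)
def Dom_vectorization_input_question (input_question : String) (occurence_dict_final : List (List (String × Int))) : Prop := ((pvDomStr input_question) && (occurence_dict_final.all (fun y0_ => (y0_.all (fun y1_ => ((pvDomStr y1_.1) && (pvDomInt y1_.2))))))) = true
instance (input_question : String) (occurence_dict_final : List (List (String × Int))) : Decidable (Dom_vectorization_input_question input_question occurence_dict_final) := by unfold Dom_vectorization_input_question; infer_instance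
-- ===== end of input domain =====

-- B inverts the loop nesting: one pass over the input words distributing increments
-- into pre-zeroed per-vocab counters, instead of rescanning the word list once per vocab key.


-- ===== PORT A =====
-- Literal port of A: for each (index, vocab_question) of enumerate(occurence_dict_final),
-- build counts[k] = input_words.count(k) for every key k of occurence_dict_final[index]
-- (the enumerate index is always in range, so pyGetD's default is never used),
-- and insert it under `index` into the outer dict; dicts are PySem.Dict, returned as items.
def vectorization_input_question (input_question : String) (occurence_dict_final : List (List (String × Int))) : List (Int × List (String × Int)) :=
  let input_question_feature_dict : PySem.Dict Int (PySem.Dict String Int) :=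
    (PySem.List.enumerate occurence_dict_final).foldl (fun acc p =>
      let input_words := PySem.Str.split₀ input_question
      let vocab_question_keys := (PySem.Dict.ofList (PySem.List.pyGetD occurence_dict_final p.1 [])).keys
      let counts : PySem.Dict String Int :=
        vocab_question_keys.foldl (fun c k => c.insert k ((PySem.List.count input_words k : Int))) PySem.Dict.empty
      acc.insert p.1 counts) PySem.Dict.empty
  input_question_feature_dict.items.map (fun p => (p.1, p.2.items))

-- ===== PORT B =====
-- Literal port of B (Source B): zero-initialized counters, then a single pass over the words
-- incrementing each counter that contains the word; finally the {i: c} dict over enumerate.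
def vectorization_input_question_alt (input_question : String) (occurence_dict_final : List (List (String × Int))) : List (Int × List (String × Int)) :=
  let counts_list : List (PySem.Dict String Int) :=
    occurence_dict_final.map (fun d =>
      (PySem.Dict.ofList d).keys.foldl (fun c k => c.insert k (0 : Int)) PySem.Dict.empty)
  let counts_list := (PySem.Str.split₀ input_question).foldl (fun cl word =>
      cl.map (fun counts => if counts.contains word then counts.modify word 0 (· + 1) else counts)) counts_list
  let result : PySem.Dict Int (PySem.Dict String Int) :=
    (PySem.List.enumerate counts_list).foldl (fun acc p => acc.insert p.1 p.2) PySem.Dict.empty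
  result.items.map (fun p => (p.1, p.2.items))

-- ===== PRECONDITION & SPEC =====
def Spec_vectorization_input_question (input_question : String) (occurence_dict_final : List (List (String × Int))) (out : List (Int × List (String × Int))) : Prop := out = vectorization_input_question_alt input_question occurence_dict_final
instance (input_question : String) (occurence_dict_final : List (List (String × Int))) (out : List (Int × List (String × Int))) : Decidable (Spec_vectorization_input_question input_question occurence_dict_final out) := by unfold Spec_vectorization_input_question; infer_instance

-- ===== CLAIM (what is proved, stated in full; the proofs are below) =====
def Claim_equal_vectorization_input_question : Prop := ∀ (input_question : String) (occurence_dict_final : List (List (String × Int))), Dom_vectorization_input_question input_question occurence_dict_final → Spec_vectorization_input_question input_question occurence_dict_final (vectorization_input_question input_question occurence_dict_final)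

-- ===== LEMMAS AND PROOFS =====

-- Building a dict by folding inserts over pairs with strictly increasing keys: items = the map.
theorem pv_items_foldl_fresh {ν β : Type} (l : List (Int × β)) (f : Int × β → ν)
    (h : l.Pairwise (fun p q => p.1 < q.1)) :
    ((l.foldl (fun (acc : PySem.Dict Int ν) p => acc.insert p.1 (f p)) PySem.Dict.empty).items)
      = l.map (fun p => (p.1, f p)) := by
  have hnd : (List.map (fun p : Int × β => p.1) l).Nodup :=
    (List.pairwise_map.mpr h).imp ne_of_lt
  rw [PySem.Dict.items_foldl_insert_fresh l (fun p => p.1) f PySem.Dict.empty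
    (fun a _ => PySem.Dict.contains_empty _) hnd]
  simp [PySem.Dict.empty]

-- The zero-initialized counter over a nodup key list: items = keys paired with 0.
theorem pv_zero_items (keys : List String) (h : keys.Nodup) :
    ((keys.foldl (fun (c : PySem.Dict String Int) k => c.insert k (0 : Int)) PySem.Dict.empty).items)
      = keys.map (fun k => (k, (0 : Int))) := by
  have := PySem.Dict.items_foldl_insert_fresh keys (fun x => x) (fun _ => (0 : Int)) PySem.Dict.empty
    (fun a _ => PySem.Dict.contains_empty _) (by simpa using h)
  simpa [PySem.Dict.empty] using this

-- A's counter over a nodup key list: items = keys paired with their count in the word list.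
theorem pv_count_items (keys : List String) (h : keys.Nodup) (ws : List String) :
    ((keys.foldl (fun (c : PySem.Dict String Int) k => c.insert k ((PySem.List.count ws k : Int))) PySem.Dict.empty).items)
      = keys.map (fun k => (k, (PySem.List.count ws k : Int))) := by
  have := PySem.Dict.items_foldl_insert_fresh keys (fun x => x) (fun k => ((PySem.List.count ws k : Int))) PySem.Dict.empty
    (fun a _ => PySem.Dict.contains_empty _) (by simpa using h)
  simpa [PySem.Dict.empty] using this

-- B's word loop over a list of counters = mapping each counter through its own word loop.
theorem pv_foldl_map_comm {ν : Type} (g : String → ν → ν) (ws : List String) (cl : List ν) :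
    (ws.foldl (fun cl w => cl.map (g w)) cl)
      = cl.map (fun c => ws.foldl (fun c w => g w c) c) := by
  induction ws generalizing cl with
  | nil => simp
  | cons w ws ih => simp [List.foldl_cons, ih, List.map_map, Function.comp_def]

-- The per-counter word loop preserves keys.
theorem pv_step_keys (ws : List String) (c : PySem.Dict String Int) :
    (ws.foldl (fun c w => if c.contains w then c.modify w 0 (· + 1) else c) c).keys = c.keys := by
  induction ws generalizing c with
  | nil => rfl
  | cons w ws ih =>
    simp only [List.foldl_cons]
    by_cases hc : c.contains w = true
    · rw [ih, hc, if_pos rfl, PySem.Dict.keys_modify,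
        PySem.Dict.keys_insert_of_contains _ _ (by simpa [PySem.Dict.contains_modify] using hc)]
    · simp [hc, ih]

-- The per-counter word loop adds the word count to every contained key's value.
theorem pv_step_getD (ws : List String) (c : PySem.Dict String Int) (k : String) :
    (ws.foldl (fun c w => if c.contains w then c.modify w 0 (· + 1) else c) c).getD k 0
      = c.getD k 0 + (if c.contains k then (ws.count k : Int) else 0) := by
  induction ws generalizing c with
  | nil => simp
  | cons w ws ih =>
    simp only [List.foldl_cons]
    by_cases hc : c.contains w = true
    · rw [if_pos hc, ih]
      by_cases hk : k = w
      · subst hk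
        simp [PySem.Dict.contains_modify, hc]
        ring
      · have hwk : w ≠ k := fun h => hk h.symm
        simp [PySem.Dict.getD_modify, PySem.Dict.contains_modify, hk, hwk]
    · rw [if_neg hc, ih]
      by_cases hk : k = w
      · subst hk; simp [hc]
      · have hwk : w ≠ k := fun h => hk h.symm
        simp [hwk]

-- The per-dict equality: B's word loop over the zero counter has the same items as A's counter.
theorem pv_dict_eq (d : List (String × Int)) (ws : List String) :
    ((ws.foldl (fun c w => if c.contains w then c.modify w 0 (· + 1) else c)
        ((PySem.Dict.ofList d).keys.foldl (fun (c : PySem.Dict String Int) k => c.insert k (0 : Int)) PySem.Dict.empty)).items)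
      = ((PySem.Dict.ofList d).keys.foldl
          (fun (c : PySem.Dict String Int) k => c.insert k ((PySem.List.count ws k : Int))) PySem.Dict.empty).items := by
  have hnd := PySem.Dict.nodup_keys_ofList d
  set keys := (PySem.Dict.ofList d).keys with hk
  set z : PySem.Dict String Int := keys.foldl (fun c k => c.insert k (0 : Int)) PySem.Dict.empty with hz
  have hzitems : z.items = keys.map (fun k => (k, (0 : Int))) := pv_zero_items keys hnd
  have hzkeys : z.keys = keys := by
    simp [PySem.Dict.keys, hzitems, Function.comp_def]
  have hres : (ws.foldl (fun c w => if c.contains w then c.modify w 0 (· + 1) else c) z).keys = keys := by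
    rw [pv_step_keys, hzkeys]
  rw [PySem.Dict.items_eq_map_keys _ (hres ▸ hnd) 0, hres, pv_count_items keys hnd ws]
  apply List.map_congr_left
  intro k hkmem
  have hcz : z.contains k = true := (PySem.Dict.contains_iff_mem_keys z k).mpr (hzkeys ▸ hkmem)
  have hgz : z.getD k 0 = 0 := by
    apply PySem.Dict.getD_of_mem_items z _ (hzkeys ▸ hnd)
    rw [hzitems]; exact List.mem_map_of_mem hkmem
  rw [pv_step_getD, hcz, if_pos rfl, hgz, zero_add]
  simp [PySem.List.count]

-- enumerate over a mapped list.
theorem pv_enumerate_map {α β : Type} (g : α → β) (xs : List α) (s : Int) :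
    PySem.List.enumerate (xs.map g) s = (PySem.List.enumerate xs s).map (fun p => (p.1, g p.2)) := by
  induction xs generalizing s with
  | nil => simp [PySem.List.enumerate_nil]
  | cons x xs ih => simp [PySem.List.enumerate_cons, ih]

-- ===== VERDICT (by name: the statement is the Claim_ definition above) =====
theorem vectorization_input_question_spec : Claim_equal_vectorization_input_question := by
  intro q ds _
  unfold Spec_vectorization_input_question vectorization_input_question vectorization_input_question_alt
  simp only [pv_foldl_map_comm, pv_enumerate_map, List.map_map, Function.comp_def]
  rw [pv_items_foldl_fresh _ _ (PySem.List.pairwise_lt_enumerate ds 0),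
    pv_items_foldl_fresh ((PySem.List.enumerate ds).map (fun p => (p.1,
        ((PySem.Str.split₀ q).foldl (fun c w => if c.contains w then c.modify w 0 (· + 1) else c)
          ((PySem.Dict.ofList p.2).keys.foldl (fun (c : PySem.Dict String Int) k => c.insert k (0 : Int)) PySem.Dict.empty)))))
      (fun p => p.2) (List.pairwise_map.mpr (PySem.List.pairwise_lt_enumerate ds 0))]
  simp only [List.map_map, Function.comp_def]
  apply List.map_congr_left
  intro p hp
  obtain ⟨k, hklt, rfl⟩ := (PySem.List.mem_enumerate_iff ds 0 p).mp hp
  have hget : PySem.List.pyGetD ds ((0 : Int) + (k : Int)) [] = ds[k] := by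
    rw [zero_add, PySem.List.pyGetD_natCast, List.getD_eq_getElem ds [] hklt]
  simp only [hget]
  exact congrArg (fun l => ((0 : Int) + (k : Int), l)) (pv_dict_eq ds[k] (PySem.Str.split₀ q)).symm
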